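-- pv_equiv track=rewrite | github.com/Wendealai/image-prompt-library | backend/services/prompt_template_fallbacks.py | _paragraph_spans
-- ===== SOURCE A (Python) =====
-- def _paragraph_spans(text: str) -> list[tuple[int, int]]:
--     spans: list[tuple[int, int]] = []
--     block_start: int | None = None
--     block_end: int | None = None
--     offset = 0
--
--     for line in text.splitlines(keepends=True):
--         no_newline = line.rstrip("\r\n")
--         stripped = no_newline.strip()
--         if stripped:
--             leading = len(no_newline) - len(no_newline.lstrip())
--             trailing = len(no_newline.rstrip())
--             if block_start is None:
--                 block_start = offset + leading
--             block_end = offset + trailing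
--         elif block_start is not None and block_end is not None:
--             spans.append((block_start, block_end))
--             block_start = None
--             block_end = None
--         offset += len(line)
--
--     if block_start is not None and block_end is not None:
--         spans.append((block_start, block_end))
--     return [(start, end) for start, end in spans if end > start]
-- ===== SOURCE B (Python) =====
-- def _paragraph_spans(text: str) -> list[tuple[int, int]]:
--     # Character-level single scan: no line splitting at all. A span runs from a
--     # non-whitespace character to the last non-whitespace character of its
--     # paragraph; a paragraph break is two or more line breaks ('\n', '\r' or
--     # the pair '\r\n' counting as one break) between non-whitespace characters.
--     spans: list[tuple[int, int]] = []
--     start = None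
--     end = 0
--     breaks = 0  # line breaks seen since the last non-whitespace character
--     i = 0
--     n = len(text)
--     while i < n:
--         c = text[i]
--         if c == ' ' or c == '\t':
--             i += 1
--         elif c == '\n' or c == '\r':
--             breaks += 1
--             if c == '\r' and i + 1 < n and text[i + 1] == '\n':
--                 i += 2
--             else:
--                 i += 1
--         else:
--             if start is None or breaks >= 2:
--                 if start is not None:
--                     spans.append((start, end))
--                 start = i
--             end = i + 1
--             breaks = 0
--             i += 1
--     if start is not None:
--         spans.append((start, end))
--     return spans
-- ===== Notes on version B (the rewrite author's own statement) =====
-- stated objective: alternative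
-- what changed: Replaces A's splitlines(keepends=True) loop with per-line strip/lstrip/rstrip arithmetic by a single character-level scan that never forms lines: it tracks the count of line breaks (\r\n merged) since the last non-whitespace character and opens/extends/flushes a span directly at each non-whitespace character, making the final end>start filter unnecessary.
import Mathlib
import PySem

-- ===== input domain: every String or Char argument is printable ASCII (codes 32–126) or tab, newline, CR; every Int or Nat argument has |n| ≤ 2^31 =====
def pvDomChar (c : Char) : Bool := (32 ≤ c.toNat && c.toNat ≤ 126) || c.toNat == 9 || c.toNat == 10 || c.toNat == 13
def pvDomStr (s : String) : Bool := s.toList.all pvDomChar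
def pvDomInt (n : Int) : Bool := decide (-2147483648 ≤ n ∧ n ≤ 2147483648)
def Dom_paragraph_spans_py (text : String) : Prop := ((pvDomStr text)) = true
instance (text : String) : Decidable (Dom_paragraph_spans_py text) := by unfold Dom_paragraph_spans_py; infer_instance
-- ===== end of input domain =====

-- B replaces A's line-splitting state machine by a single character-level scan
-- that counts line breaks between non-whitespace characters (alternative, same cost).

-- ===== PORT A =====
-- hand port of str.splitlines(keepends=True): exact on the task domain, whose only
-- line-break characters are '\n', '\r' and the pair "\r\n" (Dom admits no other break chars).
def pvSplitKeepGo (acc : List Char) : List Char → List (List Char)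
  | [] => if acc.isEmpty then [] else [acc.reverse]
  | c :: rest =>
    if c = '\n' then (acc.reverse ++ ['\n']) :: pvSplitKeepGo [] rest
    else if c = '\r' then
      if rest.head? = some '\n' then (acc.reverse ++ ['\r', '\n']) :: pvSplitKeepGo [] rest.tail
      else (acc.reverse ++ ['\r']) :: pvSplitKeepGo [] rest
    else pvSplitKeepGo (c :: acc) rest
termination_by l => l.length
decreasing_by all_goals (simp only [List.length_tail, List.length_cons]; omega)

def pvSplitKeep (s : List Char) : List (List Char) := pvSplitKeepGo [] s

-- str.rstrip(chars): drop trailing characters belonging to chars (exact).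
def pvRstripSet (s : List Char) (chars : List Char) : List Char :=
  (s.reverse.dropWhile (fun c => chars.contains c)).reverse

def pvStepA (st : List (Int × Int) × Option Int × Option Int × Int) (line : List Char) :
    List (Int × Int) × Option Int × Option Int × Int :=
  let (spans, bs, be, offset) := st
  let no_newline := pvRstripSet line ['\r', '\n']
  let stripped := PySem.Chars.strip no_newline
  if stripped ≠ [] then
    let leading : Int := (no_newline.length : Int) - ((PySem.Chars.lstrip no_newline).length : Int)
    let trailing : Int := ((PySem.Chars.rstrip no_newline).length : Int)
    let bs' := match bs with | none => some (offset + leading) | some s => some s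
    (spans, bs', some (offset + trailing), offset + (line.length : Int))
  else
    match bs, be with
    | some s, some e => (spans ++ [(s, e)], none, none, offset + (line.length : Int))
    | _, _ => (spans, bs, be, offset + (line.length : Int))

-- the trailing "if block_start is not None and block_end is not None: spans.append(...)"
def pvFinalize (st : List (Int × Int) × Option Int × Option Int × Int) : List (Int × Int) :=
  match st.2.1, st.2.2.1 with
  | some s, some e => st.1 ++ [(s, e)]
  | _, _ => st.1

def paragraph_spans_py (text : String) : List (Int × Int) :=
  (pvFinalize ((pvSplitKeep text.toList).foldl pvStepA ([], none, none, 0))).filter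
    (fun p => decide (p.1 < p.2))

-- ===== PORT B =====
-- Source B's while-loop over character positions, as recursion over the remaining characters;
-- i is the current position, rest.head? the lookahead text[i+1].
def pvScanB (spans : List (Int × Int)) (start : Option Int) (endv : Int) (breaks : Nat)
    (i : Int) : List Char → List (Int × Int)
  | [] =>
    match start with
    | some s0 => spans ++ [(s0, endv)]
    | none => spans
  | c :: rest =>
    if c = ' ' ∨ c = '\t' then
      pvScanB spans start endv breaks (i + 1) rest
    else if c = '\n' ∨ c = '\r' then
      if c = '\r' ∧ rest.head? = some '\n' then
        pvScanB spans start endv (breaks + 1) (i + 2) rest.tail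
      else pvScanB spans start endv (breaks + 1) (i + 1) rest
    else
      match start with
      | none => pvScanB spans (some i) (i + 1) 0 (i + 1) rest
      | some s0 =>
        if 2 ≤ breaks then pvScanB (spans ++ [(s0, endv)]) (some i) (i + 1) 0 (i + 1) rest
        else pvScanB spans (some s0) (i + 1) 0 (i + 1) rest
termination_by l => l.length
decreasing_by all_goals (simp only [List.length_tail, List.length_cons]; omega)

def paragraph_spans_py_alt (text : String) : List (Int × Int) :=
  pvScanB [] none 0 0 0 text.toList

-- ===== PRECONDITION & SPEC =====
def Spec_paragraph_spans_py (text : String) (out : List (Int × Int)) : Prop := out = paragraph_spans_py_alt text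
instance (text : String) (out : List (Int × Int)) : Decidable (Spec_paragraph_spans_py text out) := by unfold Spec_paragraph_spans_py; infer_instance

-- ===== CLAIM (what is proved, stated in full; the proofs are below) =====
def Claim_equal_paragraph_spans_py : Prop := ∀ (text : String), Dom_paragraph_spans_py text → Spec_paragraph_spans_py text (paragraph_spans_py text)

-- ===== LEMMAS AND PROOFS =====

-- B's whitespace test
def pvWsB (c : Char) : Bool := c == ' ' || c == '\t'

theorem pvCharEq (c d : Char) (h : c.toNat = d.toNat) : c = d :=
  Char.ext (UInt32.toNat_inj.mp h)

-- on domain characters that are not line breaks, Python's isspace is B's two-character test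
theorem pvIsspace_eq (c : Char) (hd : pvDomChar c = true) (h1 : ¬(c = '\n' ∨ c = '\r')) :
    PySem.Chars.isspace c = pvWsB c := by
  have hn10 : c.toNat ≠ 10 := fun h => h1 (Or.inl (pvCharEq c '\n' (by simpa using h)))
  have hn13 : c.toNat ≠ 13 := fun h => h1 (Or.inr (pvCharEq c '\r' (by simpa using h)))
  by_cases h32 : c.toNat = 32
  · have : c = ' ' := pvCharEq c ' ' (by simpa using h32)
    subst this; decide
  by_cases h9 : c.toNat = 9
  · have : c = '\t' := pvCharEq c '\t' (by simpa using h9)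
    subst this; decide
  · have hne : (c == ' ') = false := by
      simp only [beq_eq_false_iff_ne, ne_eq]
      intro h; subst h; simp at h32
    have hne2 : (c == '\t') = false := by
      simp only [beq_eq_false_iff_ne, ne_eq]
      intro h; subst h; simp at h9
    simp only [pvWsB, hne, hne2, Bool.or_self]
    simp only [pvDomChar, Bool.or_eq_true, Bool.and_eq_true, decide_eq_true_eq,
      beq_iff_eq] at hd
    simp only [PySem.Chars.isspace]
    simp only [Bool.or_eq_false_iff, Bool.and_eq_false_iff, decide_eq_false_iff_not]
    omega

theorem pvTWCongr (p q : Char → Bool) : ∀ (l : List Char), (∀ x ∈ l, p x = q x) →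
    l.takeWhile p = l.takeWhile q ∧ l.dropWhile p = l.dropWhile q := by
  intro l
  induction l with
  | nil => simp
  | cons c t ih =>
      intro h
      have hc := h c (by simp)
      have iht := ih (fun x hx => h x (List.mem_cons_of_mem _ hx))
      by_cases hp : p c
      · rw [List.takeWhile_cons, List.dropWhile_cons, List.takeWhile_cons, List.dropWhile_cons,
          hp, ← hc, hp]
        simp [iht.1, iht.2]
      · rw [List.takeWhile_cons, List.dropWhile_cons, List.takeWhile_cons, List.dropWhile_cons,
          ← hc]
        simp [Bool.eq_false_iff.mp (Bool.of_not_eq_true hp)]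

-- lstrip / rstrip of a break-free domain list, in B's vocabulary
theorem pvLstrip_eq (core : List Char) (hd : ∀ c ∈ core, pvDomChar c = true)
    (hc : ∀ c ∈ core, ¬(c = '\n' ∨ c = '\r')) :
    PySem.Chars.lstrip core = core.dropWhile pvWsB := by
  simp only [PySem.Chars.lstrip]
  exact (pvTWCongr _ _ core (fun x hx => pvIsspace_eq x (hd x hx) (hc x hx))).2

theorem pvRstrip_eq (core : List Char) (hd : ∀ c ∈ core, pvDomChar c = true)
    (hc : ∀ c ∈ core, ¬(c = '\n' ∨ c = '\r')) :
    PySem.Chars.rstrip core = (core.reverse.dropWhile pvWsB).reverse := by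
  simp only [PySem.Chars.rstrip]
  rw [(pvTWCongr _ _ core.reverse (fun x hx =>
    pvIsspace_eq x (hd x (List.mem_reverse.mp hx)) (hc x (List.mem_reverse.mp hx)))).2]

def pvLead (c : List Char) : Int := (c.length : Int) - ((PySem.Chars.lstrip c).length : Int)
def pvTrail (c : List Char) : Int := ((PySem.Chars.rstrip c).length : Int)

theorem pvStrip_nil_iff (core : List Char) (hd : ∀ c ∈ core, pvDomChar c = true)
    (hc : ∀ c ∈ core, ¬(c = '\n' ∨ c = '\r')) :
    (PySem.Chars.strip core = []) ↔ core.all pvWsB = true := by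
  simp only [PySem.Chars.strip, pvRstrip_eq _ (fun c h => hd c ((List.dropWhile_sublist _).subset h))
      (fun c h => hc c ((List.dropWhile_sublist _).subset h)),
    pvLstrip_eq _ hd hc]
  simp only [List.reverse_eq_nil_iff, List.dropWhile_eq_nil_iff, List.mem_reverse,
    List.all_eq_true]
  constructor
  · intro h x hx
    rw [← List.takeWhile_append_dropWhile (p := pvWsB) (l := core)] at hx
    rcases List.mem_append.mp hx with hx | hx
    · exact List.mem_takeWhile_imp hx
    · exact h x hx
  · intro h x hx
    exact h x ((List.dropWhile_sublist _).subset hx)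

theorem pvLead_eq (core : List Char) (hd : ∀ c ∈ core, pvDomChar c = true)
    (hc : ∀ c ∈ core, ¬(c = '\n' ∨ c = '\r')) :
    pvLead core = ((core.takeWhile pvWsB).length : Int) := by
  rw [pvLead, pvLstrip_eq _ hd hc]
  have := congrArg List.length (List.takeWhile_append_dropWhile (p := pvWsB) (l := core))
  simp only [List.length_append] at this
  omega

theorem pvTrail_eq (core : List Char) (hd : ∀ c ∈ core, pvDomChar c = true)
    (hc : ∀ c ∈ core, ¬(c = '\n' ∨ c = '\r')) :
    pvTrail core = ((core.length : Int) - ((core.reverse.takeWhile pvWsB).length : Int)) := by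
  rw [pvTrail, pvRstrip_eq _ hd hc]
  have := congrArg List.length (List.takeWhile_append_dropWhile (p := pvWsB) (l := core.reverse))
  simp only [List.length_append, List.length_reverse] at this
  simp only [List.length_reverse]
  omega

-- the per-line records A's machine traverses: (start offset, line without its newline)
def pvAnnot (off : Int) : List (List Char) → List (Int × List Char)
  | [] => []
  | l :: ls => (off, pvRstripSet l ['\r', '\n']) :: pvAnnot (off + (l.length : Int)) ls

-- A's loop, rephrased as a machine over the annotated records
def pvMA (spans : List (Int × Int)) (bs be : Option Int) :
    List (Int × List Char) → List (Int × Int)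
  | [] => match bs, be with
    | some s, some e => spans ++ [(s, e)]
    | _, _ => spans
  | (o, c) :: rs =>
      if (PySem.Chars.strip c) ≠ [] then
        pvMA spans (some (bs.getD (o + pvLead c))) (some (o + pvTrail c)) rs
      else
        match bs, be with
        | some s, some e => pvMA (spans ++ [(s, e)]) none none rs
        | _, _ => pvMA spans bs be rs

-- A's foldl over the raw keepends lines equals pvMA over the annotated records
theorem pvFoldA (lines : List (List Char)) :
    ∀ spans bs be (off : Int),
      pvFinalize (lines.foldl pvStepA (spans, bs, be, off))
      = pvMA spans bs be (pvAnnot off lines) := by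
  induction lines with
  | nil =>
      intro spans bs be off
      cases bs <;> cases be <;> simp [pvAnnot, pvMA, pvFinalize]
  | cons l ls ih =>
      intro spans bs be off
      simp only [List.foldl_cons, pvAnnot]
      by_cases hs : (PySem.Chars.strip (pvRstripSet l ['\r', '\n'])) ≠ []
      · simp only [pvStepA, if_pos hs, pvMA, pvLead, pvTrail]
        cases bs <;> exact ih _ _ _ _
      · simp only [pvStepA, if_neg hs, pvMA]
        cases bs <;> cases be <;> exact ih _ _ _ _

-- (line, rest) decomposition of a nonempty character list, following splitlines' rules
def pvLine : List Char → List Char × List Char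
  | [] => ([], [])
  | c :: r =>
    if c = '\n' then (['\n'], r)
    else if c = '\r' then
      if r.head? = some '\n' then (['\r', '\n'], r.tail) else (['\r'], r)
    else ((c :: (pvLine r).1), (pvLine r).2)

theorem pvSplitKeepGo_eq (s : List Char) : ∀ acc,
    pvSplitKeepGo acc s =
      if s.isEmpty ∧ acc.isEmpty then []
      else (acc.reverse ++ (pvLine s).1) :: pvSplitKeep (pvLine s).2 := by
  induction s using pvLine.induct with
  | case1 =>
      intro acc
      by_cases h : acc.isEmpty <;> simp [pvSplitKeepGo, pvLine, pvSplitKeep, h]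
  | case2 r =>
      intro acc
      simp [pvSplitKeepGo, pvLine, pvSplitKeep]
  | case3 r hh hne =>
      intro acc
      simp [pvSplitKeepGo, pvLine, pvSplitKeep, hh]
  | case4 r hh hne =>
      intro acc
      simp [pvSplitKeepGo, pvLine, pvSplitKeep, hh]
  | case5 c r h1 h2 ih =>
      intro acc
      rw [show pvSplitKeepGo acc (c :: r) = pvSplitKeepGo (c :: acc) r by
        simp [pvSplitKeepGo, h1, h2]]
      rw [ih (c :: acc)]
      simp [pvLine, h1, h2]

theorem pvSplitKeep_cons (s : List Char) (h : s ≠ []) :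
    pvSplitKeep s = (pvLine s).1 :: pvSplitKeep (pvLine s).2 := by
  rw [pvSplitKeep, pvSplitKeepGo_eq]
  simp [h]

-- structure of one line: core ++ brk, core break-free, brk one of the break shapes
theorem pvLine_decomp (s : List Char) (h : s ≠ []) :
    ∃ core brk, (pvLine s).1 = core ++ brk ∧ s = core ++ brk ++ (pvLine s).2 ∧
      (∀ c ∈ core, ¬(c = '\n' ∨ c = '\r')) ∧
      (brk = ['\n'] ∨ brk = ['\r', '\n'] ∨
        (brk = ['\r'] ∧ (pvLine s).2.head? ≠ some '\n') ∨
        (brk = [] ∧ (pvLine s).2 = [])) := by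
  induction s using pvLine.induct with
  | case1 => simp at h
  | case2 r =>
      exact ⟨[], ['\n'], by simp [pvLine], by simp [pvLine], by simp, by simp⟩
  | case3 r hh hne =>
      refine ⟨[], ['\r', '\n'], by simp [pvLine, hh], ?_, by simp, by simp⟩
      simp only [pvLine, hh, if_pos, if_neg hne, List.nil_append]
      cases r with
      | nil => simp at hh
      | cons d r' => simp at hh; simp [hh]
  | case4 r hh hne =>
      exact ⟨[], ['\r'], by simp [pvLine, hh], by simp [pvLine, hh], by simp,
        Or.inr (Or.inr (Or.inl ⟨rfl, by simp [pvLine, hh]⟩))⟩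
  | case5 c r h1 h2 ih =>
      by_cases hr : r = []
      · subst hr
        exact ⟨[c], [], by simp [pvLine, h1, h2], by simp [pvLine, h1, h2], by simp [h1, h2],
          Or.inr (Or.inr (Or.inr ⟨rfl, by simp [pvLine, h1, h2]⟩))⟩
      · obtain ⟨core, brk, e1, e2, hc, hb⟩ := ih hr
        refine ⟨c :: core, brk, ?_, ?_, ?_, ?_⟩
        · simp [pvLine, h1, h2, e1]
        · simp only [pvLine, if_neg h1, if_neg h2, List.cons_append]
          exact congrArg (c :: ·) (by simpa using e2)
        · intro x hx
          rcases List.mem_cons.mp hx with hx | hx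
          · subst hx; simp [h1, h2]
          · exact hc x hx
        · simpa [pvLine, h1, h2] using hb

theorem pvLine_rest_lt (s : List Char) (h : s ≠ []) : (pvLine s).2.length < s.length := by
  induction s using pvLine.induct with
  | case1 => simp at h
  | case2 r => simp [pvLine]
  | case3 r hh hne =>
      simp only [pvLine, hh, if_pos, if_neg hne]
      cases r <;> simp_all
  | case4 r hh hne => simp [pvLine, hh]
  | case5 c r h1 h2 ih =>
      by_cases hr : r = []
      · subst hr; simp [pvLine, h1, h2]
      · have := ih hr
        simp only [pvLine, if_neg h1, if_neg h2, List.length_cons]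
        omega

-- A's rstrip("\r\n") of core ++ brk is core
theorem pvRstripSet_decomp (core brk : List Char)
    (hc : ∀ c ∈ core, ¬(c = '\n' ∨ c = '\r')) (hb : ∀ c ∈ brk, c = '\n' ∨ c = '\r') :
    pvRstripSet (core ++ brk) ['\r', '\n'] = core := by
  rw [pvRstripSet, List.reverse_append, List.dropWhile_append]
  have h1 : brk.reverse.dropWhile (fun c => ['\r', '\n'].contains c) = [] := by
    rw [List.dropWhile_eq_nil_iff]
    intro x hx
    rcases hb x (List.mem_reverse.mp hx) with h | h <;> simp [h]
  have h2 : core.reverse.dropWhile (fun c => ['\r', '\n'].contains c) = core.reverse := by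
    rw [List.dropWhile_eq_self_iff]
    intro hl
    have := hc core.reverse[0] (List.mem_reverse.mp (List.getElem_mem hl))
    simp only [List.contains_eq_mem, List.mem_cons, decide_eq_true_eq]
    tauto
  rw [h1, h2]
  simp

-- the span-opening / flushing update B performs at the first non-blank character of a line
def pvNB (spans : List (Int × Int)) (st : Option Int) (e : Int) (br : Nat) (lead : Int) :
    List (Int × Int) × Int :=
  match st with
  | none => (spans, lead)
  | some s0 => if 2 ≤ br then (spans ++ [(s0, e)], lead) else (spans, s0)

theorem pvAllOfTW (p : Char → Bool) (l : List Char)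
    (h : (l.takeWhile p).length = l.length) : l.all p = true :=
  List.all_eq_true.mpr (List.takeWhile_eq_self_iff.mp ((List.takeWhile_sublist _).eq_of_length h))

theorem pvTWSnocNe (p : Char → Bool) (l : List Char) (c : Char) (h : l.all p = false) :
    (l.reverse ++ [c]).takeWhile p = l.reverse.takeWhile p := by
  rw [List.takeWhile_append, if_neg]
  intro hlen
  have := pvAllOfTW p l.reverse hlen
  rw [List.all_reverse] at this
  simp [h] at this

theorem pvTWSnocAll (p : Char → Bool) (l : List Char) (c : Char) (h : l.all p = true)
    (hc : p c = false) : (l.reverse ++ [c]).takeWhile p = l.reverse := by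
  have hself : l.reverse.takeWhile p = l.reverse :=
    List.takeWhile_eq_self_iff.mpr (fun x hx => List.all_eq_true.mp h x (List.mem_reverse.mp hx))
  rw [List.takeWhile_append, if_pos (by rw [hself])]
  simp [hc]

-- scanning a break-free line segment
theorem pvScanCore (core : List Char) (hc : ∀ c ∈ core, ¬(c = '\n' ∨ c = '\r')) :
    ∀ spans st e (br : Nat) (i : Int) tail,
      pvScanB spans st e br i (core ++ tail) =
        if core.all pvWsB then pvScanB spans st e br (i + core.length) tail
        else
          pvScanB (pvNB spans st e br (i + (core.takeWhile pvWsB).length)).1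
            (some (pvNB spans st e br (i + (core.takeWhile pvWsB).length)).2)
            (i + ((core.length : Int) - ((core.reverse.takeWhile pvWsB).length : Int)))
            0 (i + core.length) tail := by
  induction core with
  | nil => intro spans st e br i tail; simp
  | cons c core ih =>
      intro spans st e br i tail
      have hcl := hc c (by simp)
      have ihc := ih (fun x hx => hc x (List.mem_cons_of_mem _ hx))
      have htw_le : (core.reverse.takeWhile pvWsB).length ≤ core.length := by
        simpa using (List.takeWhile_sublist (p := pvWsB) (l := core.reverse)).length_le
      by_cases hw : pvWsB c = true
      · -- whitespace character: one step, then IH on core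
        have hor : c = ' ' ∨ c = '\t' := by
          rcases Bool.or_eq_true _ _ |>.mp hw with h | h
          · exact Or.inl (by simpa using h)
          · exact Or.inr (by simpa using h)
        have hstep : pvScanB spans st e br i ((c :: core) ++ tail)
            = pvScanB spans st e br (i + 1) (core ++ tail) := by
          rw [List.cons_append]
          cases st with
          | none => rw [pvScanB.eq_3, if_pos hor]
          | some s0 => rw [pvScanB.eq_4, if_pos hor]
        rw [hstep, ihc]
        by_cases hall : core.all pvWsB = true
        · have hall2 : (c :: core).all pvWsB = true := by simp [hall, hw]
          rw [if_pos hall, if_pos hall2, List.length_cons]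
          have : i + 1 + (core.length : Int) = i + ((core.length + 1 : Nat) : Int) := by
            push_cast; ring
          rw [this]
        · have hall2 : (c :: core).all pvWsB = false := by simp [hall]
          rw [if_neg (by simp [hall]), if_neg (by simp [hall2])]
          have htw : ((c :: core).takeWhile pvWsB) = c :: core.takeWhile pvWsB := by
            simp [hw]
          have htwr : ((c :: core).reverse.takeWhile pvWsB) = core.reverse.takeWhile pvWsB := by
            rw [List.reverse_cons]
            exact pvTWSnocNe pvWsB core c (eq_false_of_ne_true hall)
          have e1 : i + (((c :: core).takeWhile pvWsB).length : Int)
              = i + 1 + ((core.takeWhile pvWsB).length : Int) := by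
            rw [htw]; push_cast [List.length_cons]; ring
          have e2 : i + ((((c :: core).length : Nat) : Int)
                - (((c :: core).reverse.takeWhile pvWsB).length : Int))
              = i + 1 + ((core.length : Int) - ((core.reverse.takeWhile pvWsB).length : Int)) := by
            rw [htwr]; push_cast [List.length_cons]; ring
          have e3 : i + (((c :: core).length : Nat) : Int) = i + 1 + (core.length : Int) := by
            push_cast [List.length_cons]; ring
          rw [e1, e2, e3]
      · -- first non-whitespace (and non-break) character of the line
        have hnw : ¬(c = ' ' ∨ c = '\t') := by
          intro h
          rcases h with h | h <;> simp [pvWsB, h] at hw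
        have hall2 : (c :: core).all pvWsB = false := by simp [hw]
        have htw0 : ((c :: core).takeWhile pvWsB) = [] := by
          simp [hw]
        have hstep : pvScanB spans st e br i ((c :: core) ++ tail)
            = pvScanB (pvNB spans st e br i).1 (some (pvNB spans st e br i).2)
                (i + 1) 0 (i + 1) (core ++ tail) := by
          rw [List.cons_append]
          cases st with
          | none => rw [pvScanB.eq_3, if_neg hnw, if_neg hcl]; simp [pvNB]
          | some s0 =>
              rw [pvScanB.eq_4, if_neg hnw, if_neg hcl]
              by_cases hbr : 2 ≤ br
              · rw [if_pos hbr]; simp [pvNB, hbr]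
              · rw [if_neg hbr]; simp [pvNB, hbr]
        rw [hstep, ihc]
        by_cases hall : core.all pvWsB = true
        · rw [if_pos hall, if_neg (by simp [hall2]), htw0]
          have htwr : ((c :: core).reverse.takeWhile pvWsB) = core.reverse := by
            rw [List.reverse_cons]
            exact pvTWSnocAll pvWsB core c hall (eq_false_of_ne_true hw)
          have e2 : i + ((((c :: core).length : Nat) : Int)
                - (((c :: core).reverse.takeWhile pvWsB).length : Int)) = i + 1 := by
            rw [htwr]; push_cast [List.length_cons, List.length_reverse]; ring
          have e3 : i + (((c :: core).length : Nat) : Int) = i + 1 + (core.length : Int) := by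
            push_cast [List.length_cons]; ring
          rw [e2, e3]
          simp
        · rw [if_neg hall, if_neg (by simp [hall2]), htw0]
          have hnb : pvNB (pvNB spans st e br i).1 (some (pvNB spans st e br i).2) (i + 1) 0
              (i + 1 + ((core.takeWhile pvWsB).length : Int)) = pvNB spans st e br i := by
            simp [pvNB]
          rw [hnb]
          have htwr : ((c :: core).reverse.takeWhile pvWsB) = core.reverse.takeWhile pvWsB := by
            rw [List.reverse_cons]
            exact pvTWSnocNe pvWsB core c (eq_false_of_ne_true hall)
          have e2 : i + ((((c :: core).length : Nat) : Int)
                - (((c :: core).reverse.takeWhile pvWsB).length : Int))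
              = i + 1 + ((core.length : Int) - ((core.reverse.takeWhile pvWsB).length : Int)) := by
            rw [htwr]; push_cast [List.length_cons]; ring
          have e3 : i + (((c :: core).length : Nat) : Int) = i + 1 + (core.length : Int) := by
            push_cast [List.length_cons]; ring
          rw [e2, e3]
          simp

-- A-machine state corresponding to B's scan state
def pvRel (spans : List (Int × Int)) (st : Option Int) (e : Int) (br : Nat) :
    List (Int × Int) × Option Int × Option Int :=
  match st with
  | none => (spans, none, none)
  | some s0 => if 2 ≤ br then (spans ++ [(s0, e)], none, none) else (spans, some s0, some e)

theorem pvScanNilMA (spans : List (Int × Int)) (st : Option Int) (e : Int) (br br' : Nat)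
    (i : Int) :
    pvScanB spans st e br i []
      = pvMA (pvRel spans st e br').1 (pvRel spans st e br').2.1 (pvRel spans st e br').2.2 [] := by
  cases st with
  | none => simp [pvScanB.eq_2, pvRel, pvMA]
  | some s0 =>
      by_cases hbr : 2 ≤ br'
      · simp [pvScanB.eq_1, pvRel, hbr, pvMA]
      · simp [pvScanB.eq_1, pvRel, hbr, pvMA]

theorem pvMA_rel_blank (core : List Char) (h : PySem.Chars.strip core = []) (o : Int)
    (rs : List (Int × List Char)) (spans : List (Int × Int)) (st : Option Int) (e : Int)
    (br : Nat) (hinv : st ≠ none → 1 ≤ br) :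
    pvMA (pvRel spans st e br).1 (pvRel spans st e br).2.1 (pvRel spans st e br).2.2
        ((o, core) :: rs)
      = pvMA (pvRel spans st e (br + 1)).1 (pvRel spans st e (br + 1)).2.1
          (pvRel spans st e (br + 1)).2.2 rs := by
  cases st with
  | none => simp [pvRel, pvMA, h]
  | some s0 =>
      have h1 : 1 ≤ br := hinv (by simp)
      by_cases hbr : 2 ≤ br
      · simp [pvRel, hbr, (by omega : 2 ≤ br + 1), pvMA, h]
      · simp [pvRel, hbr, (by omega : 2 ≤ br + 1), pvMA, h]

theorem pvMA_rel_nonblank (core : List Char) (h : ¬(PySem.Chars.strip core = [])) (o : Int)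
    (rs : List (Int × List Char)) (spans : List (Int × Int)) (st : Option Int) (e : Int)
    (br : Nat) :
    pvMA (pvRel spans st e br).1 (pvRel spans st e br).2.1 (pvRel spans st e br).2.2
        ((o, core) :: rs)
      = pvMA (pvNB spans st e br (o + pvLead core)).1
          (some (pvNB spans st e br (o + pvLead core)).2) (some (o + pvTrail core)) rs := by
  cases st with
  | none => simp [pvRel, pvNB, pvMA, h]
  | some s0 =>
      by_cases hbr : 2 ≤ br
      · simp [pvRel, pvNB, hbr, pvMA, h]
      · simp [pvRel, pvNB, hbr, pvMA, h]

-- single break-character steps of B's scan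
theorem pvScanBreakNL (spans : List (Int × Int)) (st : Option Int) (e : Int) (br : Nat)
    (i : Int) (rest : List Char) :
    pvScanB spans st e br i ('\n' :: rest) = pvScanB spans st e (br + 1) (i + 1) rest := by
  cases st with
  | none => rw [pvScanB.eq_3, if_neg (by decide), if_pos (by decide), if_neg (by simp)]
  | some s0 => rw [pvScanB.eq_4, if_neg (by decide), if_pos (by decide), if_neg (by simp)]

theorem pvScanBreakCRLF (spans : List (Int × Int)) (st : Option Int) (e : Int) (br : Nat)
    (i : Int) (rest : List Char) :
    pvScanB spans st e br i ('\r' :: '\n' :: rest) = pvScanB spans st e (br + 1) (i + 2) rest := by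
  cases st with
  | none => rw [pvScanB.eq_3, if_neg (by decide), if_pos (by decide), if_pos (by simp)]; rfl
  | some s0 => rw [pvScanB.eq_4, if_neg (by decide), if_pos (by decide), if_pos (by simp)]; rfl

theorem pvScanBreakCR (spans : List (Int × Int)) (st : Option Int) (e : Int) (br : Nat)
    (i : Int) (rest : List Char) (h : rest.head? ≠ some '\n') :
    pvScanB spans st e br i ('\r' :: rest) = pvScanB spans st e (br + 1) (i + 1) rest := by
  cases st with
  | none => rw [pvScanB.eq_3, if_neg (by decide), if_pos (by decide), if_neg (by simp [h])]
  | some s0 => rw [pvScanB.eq_4, if_neg (by decide), if_pos (by decide), if_neg (by simp [h])]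

-- the bridge: B's character scan equals A's machine over the annotated split lines
theorem pvBridge (n : Nat) : ∀ (s : List Char), s.length ≤ n →
    (∀ c ∈ s, pvDomChar c = true) →
    ∀ spans (st : Option Int) (e : Int) (br : Nat) (i : Int),
      (st ≠ none → 1 ≤ br) →
      pvScanB spans st e br i s
        = pvMA (pvRel spans st e br).1 (pvRel spans st e br).2.1 (pvRel spans st e br).2.2
            (pvAnnot i (pvSplitKeep s)) := by
  induction n with
  | zero =>
      intro s hs _ spans st e br i _
      rw [List.length_eq_zero_iff.mp (Nat.le_zero.mp hs)]
      rw [show pvSplitKeep [] = [] from by simp [pvSplitKeep, pvSplitKeepGo]]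
      exact pvScanNilMA spans st e br br i
  | succ n ih =>
      intro s hs hdom spans st e br i hinv
      by_cases hns : s = []
      · subst hns
        rw [show pvSplitKeep ([] : List Char) = [] from by simp [pvSplitKeep, pvSplitKeepGo]]
        exact pvScanNilMA spans st e br br i
      · obtain ⟨core, brk, he1, he2, hcore, hbrk⟩ := pvLine_decomp s hns
        have hrl := pvLine_rest_lt s hns
        have hrest_len : (pvLine s).2.length ≤ n := by omega
        have hdc : ∀ c ∈ core, pvDomChar c = true := by
          intro c hcm
          exact hdom c (by rw [he2]; simp [hcm])
        have hdr : ∀ c ∈ (pvLine s).2, pvDomChar c = true := by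
          intro c hcm
          exact hdom c (by rw [he2]; simp [hcm])
        have hbrkmem : ∀ c ∈ brk, c = '\n' ∨ c = '\r' := by
          intro c hcm
          rcases hbrk with hb | hb | ⟨hb, _⟩ | ⟨hb, _⟩ <;> subst hb
          · simp only [List.mem_singleton] at hcm
            exact Or.inl hcm
          · simp only [List.mem_cons] at hcm
            rcases hcm with h | h
            · exact Or.inr h
            · rcases h with h | h
              · exact Or.inl h
              · simp at h
          · simp only [List.mem_singleton] at hcm
            exact Or.inr hcm
          · simp at hcm
        have hlineLen : ((pvLine s).1.length : Int) = (core.length : Int) + (brk.length : Int) := by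
          rw [he1]; push_cast [List.length_append]; ring
        -- rewrite the A side into one record plus the rest
        rw [pvSplitKeep_cons s hns]
        rw [show pvAnnot i ((pvLine s).1 :: pvSplitKeep (pvLine s).2)
            = (i, core) :: pvAnnot (i + ((pvLine s).1.length : Int)) (pvSplitKeep (pvLine s).2) from by
          simp [pvAnnot, he1, pvRstripSet_decomp core brk hcore hbrkmem]]
        -- rewrite the B side: scan the core, then the break
        conv_lhs => rw [he2, List.append_assoc]
        rw [pvScanCore core hcore]
        by_cases hall : core.all pvWsB = true
        · -- blank line
          have hstrip : PySem.Chars.strip core = [] := (pvStrip_nil_iff core hdc hcore).mpr hall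
          rw [if_pos hall, pvMA_rel_blank core hstrip i _ spans st e br hinv]
          rcases hbrk with hb | hb | ⟨hb, hh⟩ | ⟨hb, hr⟩
          · subst hb
            rw [List.singleton_append, pvScanBreakNL,
              ih (pvLine s).2 hrest_len hdr spans st e (br + 1) _ (fun _ => by omega)]
            rw [show i + (core.length : Int) + 1 = i + ((pvLine s).1.length : Int) from by
              rw [hlineLen]; simp; ring]
          · subst hb
            rw [show (['\r', '\n'] : List Char) ++ (pvLine s).2 = '\r' :: '\n' :: (pvLine s).2 from rfl,
              pvScanBreakCRLF,
              ih (pvLine s).2 hrest_len hdr spans st e (br + 1) _ (fun _ => by omega)]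
            rw [show i + (core.length : Int) + 2 = i + ((pvLine s).1.length : Int) from by
              rw [hlineLen]; simp; ring]
          · subst hb
            rw [List.singleton_append, pvScanBreakCR _ _ _ _ _ _ hh,
              ih (pvLine s).2 hrest_len hdr spans st e (br + 1) _ (fun _ => by omega)]
            rw [show i + (core.length : Int) + 1 = i + ((pvLine s).1.length : Int) from by
              rw [hlineLen]; simp; ring]
          · subst hb
            rw [hr]
            rw [show pvSplitKeep ([] : List Char) = [] from by simp [pvSplitKeep, pvSplitKeepGo]]
            simp only [List.nil_append, pvAnnot]
            exact pvScanNilMA spans st e br (br + 1) _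
        · -- non-blank line
          have hstrip : ¬(PySem.Chars.strip core = []) := fun hx =>
            hall ((pvStrip_nil_iff core hdc hcore).mp hx)
          rw [if_neg hall, pvMA_rel_nonblank core hstrip i _ spans st e br]
          rw [show i + pvLead core = i + ((core.takeWhile pvWsB).length : Int) from by
            rw [pvLead_eq core hdc hcore]]
          rw [show some (i + pvTrail core)
              = some (i + ((core.length : Int) - ((core.reverse.takeWhile pvWsB).length : Int)))
            from by rw [pvTrail_eq core hdc hcore]]
          set NB := pvNB spans st e br (i + ((core.takeWhile pvWsB).length : Int)) with hNB
          rcases hbrk with hb | hb | ⟨hb, hh⟩ | ⟨hb, hr⟩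
          · subst hb
            rw [List.singleton_append, pvScanBreakNL,
              ih (pvLine s).2 hrest_len hdr NB.1 (some NB.2) _ 1 _ (fun _ => le_refl 1)]
            rw [show pvRel NB.1 (some NB.2)
                (i + ((core.length : Int) - ((core.reverse.takeWhile pvWsB).length : Int))) 1
              = (NB.1, some NB.2,
                  some (i + ((core.length : Int) - ((core.reverse.takeWhile pvWsB).length : Int))))
              from by simp [pvRel]]
            rw [show i + (core.length : Int) + 1 = i + ((pvLine s).1.length : Int) from by
              rw [hlineLen]; simp; ring]
          · subst hb
            rw [show (['\r', '\n'] : List Char) ++ (pvLine s).2 = '\r' :: '\n' :: (pvLine s).2 from rfl,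
              pvScanBreakCRLF,
              ih (pvLine s).2 hrest_len hdr NB.1 (some NB.2) _ 1 _ (fun _ => le_refl 1)]
            rw [show pvRel NB.1 (some NB.2)
                (i + ((core.length : Int) - ((core.reverse.takeWhile pvWsB).length : Int))) 1
              = (NB.1, some NB.2,
                  some (i + ((core.length : Int) - ((core.reverse.takeWhile pvWsB).length : Int))))
              from by simp [pvRel]]
            rw [show i + (core.length : Int) + 2 = i + ((pvLine s).1.length : Int) from by
              rw [hlineLen]; simp; ring]
          · subst hb
            rw [List.singleton_append, pvScanBreakCR _ _ _ _ _ _ hh,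
              ih (pvLine s).2 hrest_len hdr NB.1 (some NB.2) _ 1 _ (fun _ => le_refl 1)]
            rw [show pvRel NB.1 (some NB.2)
                (i + ((core.length : Int) - ((core.reverse.takeWhile pvWsB).length : Int))) 1
              = (NB.1, some NB.2,
                  some (i + ((core.length : Int) - ((core.reverse.takeWhile pvWsB).length : Int))))
              from by simp [pvRel]]
            rw [show i + (core.length : Int) + 1 = i + ((pvLine s).1.length : Int) from by
              rw [hlineLen]; simp; ring]
          · subst hb
            rw [hr]
            rw [show pvSplitKeep ([] : List Char) = [] from by simp [pvSplitKeep, pvSplitKeepGo]]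
            simp only [List.nil_append, pvAnnot]
            rw [pvScanB.eq_1]
            simp [pvMA]
  -- end pvBridge

-- every span B emits satisfies start < end
theorem pvGoodB (n : Nat) : ∀ (s : List Char), s.length ≤ n →
    ∀ spans (st : Option Int) (e : Int) (br : Nat) (i : Int),
      (∀ p ∈ spans, p.1 < p.2) → (∀ s0, st = some s0 → s0 < e) → e ≤ i →
      ∀ p ∈ pvScanB spans st e br i s, p.1 < p.2 := by
  induction n with
  | zero =>
      intro s hs spans st e br i h1 h2 h3 p hp
      rw [List.length_eq_zero_iff.mp (Nat.le_zero.mp hs)] at hp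
      cases st with
      | none => exact h1 p (by rwa [pvScanB.eq_2] at hp)
      | some s0 =>
          rw [pvScanB.eq_1] at hp
          rcases List.mem_append.mp hp with h | h
          · exact h1 p h
          · simp only [List.mem_singleton] at h
            subst h
            exact h2 s0 rfl
  | succ n ih =>
      intro s hs spans st e br i h1 h2 h3 p hp
      cases s with
      | nil =>
          cases st with
          | none => exact h1 p (by rwa [pvScanB.eq_2] at hp)
          | some s0 =>
              rw [pvScanB.eq_1] at hp
              rcases List.mem_append.mp hp with h | h
              · exact h1 p h
              · simp only [List.mem_singleton] at h
                subst h
                exact h2 s0 rfl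
      | cons c rest =>
          have hlen : rest.length ≤ n := by simpa using hs
          have hlen2 : rest.tail.length ≤ n := le_trans (by simp [List.length_tail]) hlen
          by_cases hsp : c = ' ' ∨ c = '\t'
          · cases st with
            | none =>
                rw [pvScanB.eq_3, if_pos hsp] at hp
                exact ih rest hlen spans none e br (i + 1) h1 h2 (by omega) p hp
            | some s0 =>
                rw [pvScanB.eq_4, if_pos hsp] at hp
                exact ih rest hlen spans (some s0) e br (i + 1) h1 h2 (by omega) p hp
          · by_cases hbk : c = '\n' ∨ c = '\r'
            · by_cases hcr : c = '\r' ∧ rest.head? = some '\n'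
              · cases st with
                | none =>
                    rw [pvScanB.eq_3, if_neg hsp, if_pos hbk, if_pos hcr] at hp
                    exact ih rest.tail hlen2 spans none e (br + 1) (i + 2) h1 h2 (by omega) p hp
                | some s0 =>
                    rw [pvScanB.eq_4, if_neg hsp, if_pos hbk, if_pos hcr] at hp
                    exact ih rest.tail hlen2 spans (some s0) e (br + 1) (i + 2) h1 h2 (by omega) p hp
              · cases st with
                | none =>
                    rw [pvScanB.eq_3, if_neg hsp, if_pos hbk, if_neg hcr] at hp
                    exact ih rest hlen spans none e (br + 1) (i + 1) h1 h2 (by omega) p hp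
                | some s0 =>
                    rw [pvScanB.eq_4, if_neg hsp, if_pos hbk, if_neg hcr] at hp
                    exact ih rest hlen spans (some s0) e (br + 1) (i + 1) h1 h2 (by omega) p hp
            · cases st with
              | none =>
                  rw [pvScanB.eq_3, if_neg hsp, if_neg hbk] at hp
                  exact ih rest hlen spans (some i) (i + 1) 0 (i + 1) h1
                    (fun s0 h => by injection h with h; omega) (by omega) p hp
              | some s0 =>
                  have hs0 : s0 < e := h2 s0 rfl
                  rw [pvScanB.eq_4, if_neg hsp, if_neg hbk] at hp
                  by_cases hbr : 2 ≤ br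
                  · rw [if_pos hbr] at hp
                    refine ih rest hlen (spans ++ [(s0, e)]) (some i) (i + 1) 0 (i + 1) ?_
                      (fun x h => by injection h with h; omega) (by omega) p hp
                    intro q hq
                    rcases List.mem_append.mp hq with h | h
                    · exact h1 q h
                    · simp only [List.mem_singleton] at h
                      subst h
                      exact hs0
                  · rw [if_neg hbr] at hp
                    exact ih rest hlen spans (some s0) (i + 1) 0 (i + 1) h1
                      (fun x h => by injection h with h; omega) (by omega) p hp

-- ===== VERDICT (by name: the statement is the Claim_ definition above) =====
theorem paragraph_spans_py_spec : Claim_equal_paragraph_spans_py := by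
  intro text hdom
  unfold Spec_paragraph_spans_py paragraph_spans_py paragraph_spans_py_alt
  have hd : ∀ c ∈ text.toList, pvDomChar c = true := by
    intro c hc
    exact List.all_eq_true.mp hdom c hc
  rw [pvFoldA]
  have hb : pvScanB [] none 0 0 0 text.toList
      = pvMA [] none none (pvAnnot 0 (pvSplitKeep text.toList)) := by
    rw [pvBridge text.toList.length text.toList le_rfl hd [] none 0 0 0 (by simp)]
    simp [pvRel]
  rw [← hb]
  exact List.filter_eq_self.mpr
    (fun p hp => by
      simpa using pvGoodB text.toList.length text.toList le_rfl [] none 0 0 0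
        (by simp) (by simp) le_rfl p hp)
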